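-- pv_equiv track=rewrite | github.com/serrasqueiro/tinycode | thunder/profkind.py | valid_key
-- ===== SOURCE A (Python) =====
-- def valid_key(key:str) -> str:
--     """ Returns True if string 'key' is a valid key for '[Key]'... """
--     last = " "
--     if not key:
--         return ""
--     for achr in key:
--         if achr == " ":
--             if last == " ":
--                 return ""	# No two consecutive blanks!
--             last = achr
--             continue
--         if not achr.isalnum():
--             return ""
--         last = achr
--     return key.lower().replace(" ", "-")
-- ===== SOURCE B (Python) =====
-- def valid_key(key: str) -> str:
--     if not key or key[0] == " " or "  " in key or not all(c.isalnum() or c == " " for c in key):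
--         return ""
--     return key.lower().replace(" ", "-")
-- ===== Notes on version B (the rewrite author's own statement) =====
-- stated objective: idiomatic
-- what changed: Replaced the stateful last-character tracking loop with one guard of independent checks: emptiness, leading space, a double-space substring-membership scan for consecutive blanks, and an all() alphanumeric-or-space test, followed by the normalization.
import Mathlib
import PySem

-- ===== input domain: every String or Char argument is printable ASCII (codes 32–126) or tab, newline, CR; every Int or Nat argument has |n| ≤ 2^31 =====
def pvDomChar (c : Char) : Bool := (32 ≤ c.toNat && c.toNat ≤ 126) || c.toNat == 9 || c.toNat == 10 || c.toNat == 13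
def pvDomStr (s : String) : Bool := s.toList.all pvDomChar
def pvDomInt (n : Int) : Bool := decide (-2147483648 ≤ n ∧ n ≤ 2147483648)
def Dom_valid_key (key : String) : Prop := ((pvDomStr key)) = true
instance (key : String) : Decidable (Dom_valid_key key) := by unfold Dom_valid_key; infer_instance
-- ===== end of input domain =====

-- B replaces A's stateful `last`-tracking loop by a single guard of independent checks (idiomatic; same cost).

-- ===== PORT A =====
-- A's for-loop over key carrying the `last` state; `false` = an early `return ""`
def validKeyLoop : List Char → Char → Bool
  | [], _ => true
  | c :: cs, last =>
    if c = ' ' then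
      (if last = ' ' then false else validKeyLoop cs c)
    else if PySem.Chars.isalnum c then validKeyLoop cs c
    else false

def valid_key (key : String) : String :=
  if key.toList.isEmpty then ""
  else if validKeyLoop key.toList ' ' then
    PySem.Str.replace (PySem.Str.lower key) " " "-"
  else ""

-- ===== PORT B =====
def valid_key_alt (key : String) : String :=
  let cs := key.toList
  if cs.isEmpty || (cs.head? == some ' ') || PySem.Chars.isIn [' ', ' '] cs
      || !(cs.all fun c => PySem.Chars.isalnum c || c == ' ') then ""
  else PySem.Str.replace (PySem.Str.lower key) " " "-"

-- ===== PRECONDITION & SPEC =====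
def Spec_valid_key (key : String) (out : String) : Prop := out = valid_key_alt key
instance (key : String) (out : String) : Decidable (Spec_valid_key key out) := by unfold Spec_valid_key; infer_instance

-- ===== CLAIM (what is proved, stated in full; the proofs are below) =====
def Claim_equal_valid_key : Prop := ∀ (key : String), Dom_valid_key key → Spec_valid_key key (valid_key key)

-- ===== LEMMAS AND PROOFS =====

lemma pair_prefix_iff (l : List Char) : ([' ', ' '] <+: l) ↔ l.head? = some ' ' ∧ ([' '] <+: l.tail) := by
  cases l with
  | nil => simp
  | cons a t => simp [List.cons_prefix_cons, eq_comm]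

lemma single_prefix_iff (l : List Char) : ([' '] <+: l) ↔ l.head? = some ' ' := by
  cases l with
  | nil => simp
  | cons a t => simp [List.cons_prefix_cons, eq_comm]

-- A's loop succeeds iff: no blank right after `last` being a blank, no two consecutive
-- blanks anywhere, and every character is alphanumeric or a blank
lemma validKeyLoop_iff (cs : List Char) (last : Char) :
    validKeyLoop cs last = true ↔
      ((last = ' ' → cs.head? ≠ some ' ') ∧ ¬ ([' ', ' '] <:+: cs)
        ∧ ∀ c ∈ cs, (PySem.Chars.isalnum c || c == ' ') = true) := by
  induction cs generalizing last with
  | nil => simp [validKeyLoop]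
  | cons c cs ih =>
    rw [show validKeyLoop (c :: cs) last =
        (if c = ' ' then (if last = ' ' then false else validKeyLoop cs c)
         else if PySem.Chars.isalnum c then validKeyLoop cs c else false) from rfl]
    rw [List.infix_cons_iff, pair_prefix_iff, List.tail_cons, single_prefix_iff]
    by_cases hc : c = ' '
    · subst hc
      by_cases hl : last = ' '
      · subst hl; simp
      · rw [if_pos rfl, if_neg hl, ih]
        simp [hl, not_or]
        tauto
    · by_cases ha : PySem.Chars.isalnum c = true
      · rw [if_neg hc, if_pos ha, ih]
        simp [hc, ha]
      · rw [if_neg hc, if_neg ha]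
        simp [hc, ha]

-- ===== VERDICT (by name: the statement is the Claim_ definition above) =====
theorem valid_key_spec : Claim_equal_valid_key := by
  intro key _
  unfold Spec_valid_key valid_key valid_key_alt
  cases h : key.toList with
  | nil => simp
  | cons c cs =>
    have hkey : validKeyLoop (c :: cs) ' ' =
        !(((c :: cs).head? == some ' ') || PySem.Chars.isIn [' ', ' '] (c :: cs)
          || !((c :: cs).all fun x => PySem.Chars.isalnum x || x == ' ')) := by
      rw [Bool.eq_iff_iff, validKeyLoop_iff]
      simp only [Bool.not_eq_true', Bool.or_eq_false_iff, List.head?_cons,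
        beq_eq_false_iff_ne, ne_eq, Option.some.injEq,
        PySem.Chars.isIn_eq_false_iff, forall_const]
      rw [Bool.not_eq_false', List.all_eq_true]
      tauto
    simp only [List.isEmpty_cons, Bool.false_or]
    rw [hkey]
    cases hb : (((c :: cs).head? == some ' ') || PySem.Chars.isIn [' ', ' '] (c :: cs)
          || !((c :: cs).all fun x => PySem.Chars.isalnum x || x == ' ')) <;> simp
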